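-- pv_equiv track=rewrite | github.com/wbfw109/study-core | src/python/wbfw109/algorithms/kakao/2021.py | get_primary_key_list
-- ===== SOURCE A (Python) =====
-- import math
--
-- def get_primary_key_list(number_list: list[int]) -> list[int]:
--     result_list = []
--     for number in number_list:
--
--         # preprocess
--         if number < 2:
--             continue
--         elif number < 4:
--             result_list.append(number)
--             continue
--
--         # process
--         is_primary_nubmer: bool = True
--
--         for i in range(2, math.floor(math.sqrt(number)) + 1):
--             quotient, remainder = divmod(number, i)
--             if remainder == 0:
--                 is_primary_nubmer = False
--                 break
--
--         if is_primary_nubmer: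
--             result_list.append(number)
--     return result_list
-- ===== SOURCE B (Python) =====
-- import math
--
--
-- def _primes_upto(r: int) -> list[int]:
--     # Sieve: collect every j = i*i, i*i+i, ... <= r for each i with i*i <= r;
--     # the unmarked numbers in [2, r] are exactly the primes up to r.
--     comps = set()
--     i = 2
--     while i * i <= r:
--         j = i * i
--         while j <= r:
--             comps.add(j)
--             j += i
--         i += 1
--     return [p for p in range(2, r + 1) if p not in comps]
--
--
-- def get_primary_key_list(number_list: list[int]) -> list[int]:
--     mx = 0
--     for n in number_list:
--         if n > mx:
--             mx = n
--     primes = _primes_upto(math.isqrt(mx))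
--     result_list = []
--     for n in number_list:
--         if n >= 2 and all(n % p != 0 for p in primes if p * p <= n):
--             result_list.append(n)
--     return result_list
-- ===== Notes on version B (the rewrite author's own statement) =====
-- stated objective: faster
-- what changed: B computes the primes up to isqrt(max(number_list)) once with a sieve (marking every multiple j of each i with i*i <= sieve bound) and then trial-divides each element by those precomputed primes only, instead of A's per-element trial division by every integer in range(2, floor(sqrt(n))+1).
import Mathlib
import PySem

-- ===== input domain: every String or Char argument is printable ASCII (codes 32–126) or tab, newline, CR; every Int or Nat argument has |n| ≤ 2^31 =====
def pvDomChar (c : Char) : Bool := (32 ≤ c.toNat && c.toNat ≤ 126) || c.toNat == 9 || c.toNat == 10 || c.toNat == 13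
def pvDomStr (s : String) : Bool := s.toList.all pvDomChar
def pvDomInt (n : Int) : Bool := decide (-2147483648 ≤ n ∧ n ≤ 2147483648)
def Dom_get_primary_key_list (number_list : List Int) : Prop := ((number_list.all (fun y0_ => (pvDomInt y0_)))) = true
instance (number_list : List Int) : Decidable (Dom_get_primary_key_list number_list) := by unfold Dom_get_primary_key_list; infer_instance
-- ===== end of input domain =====

-- B replaces A's per-element trial division over range(2, floor(sqrt(n))+1) by a sieve up to
-- isqrt(max(number_list)) computed once, after which each element is trial-divided by PRIMES only
-- (a timing run measures whether that is faster; return value proved equal on all inputs).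

-- ===== PORT A =====
-- math.floor(math.sqrt(number)) is ported as Nat.sqrt number.toNat: exact on the domain
-- (4 ≤ number ≤ 2^31, where the double sqrt rounds to an exact floor).
-- The inner flag-and-break loop is ported as a short-circuiting List.any over the same range.
def get_primary_key_list (number_list : List Int) : List Int :=
  number_list.foldl
    (fun result_list number =>
      if number < 2 then result_list
      else if number < 4 then result_list ++ [number]
      else
        let is_primary_nubmer : Bool :=
          !((PySem.List.pyRange 2 ((number.toNat.sqrt : Int) + 1) 1).any
              (fun i => PySem.Int.mod number i == 0))
        if is_primary_nubmer then result_list ++ [number] else result_list)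
    []

-- ===== PORT B =====
-- Source B's inner `while j <= r:` loop of _primes_upto: comps.add(j); j += i.
-- All values in _primes_upto are nonnegative Python ints, so it is ported over Nat;
-- the 0 < i hypothesis (always true at the call sites, where i ≥ 2) only serves termination.
def sieveInner (comps : PySem.Set Nat) (j i r : Nat) (hi : 0 < i) : PySem.Set Nat :=
  if j ≤ r then sieveInner (PySem.Set.add comps j) (j + i) i r hi else comps
termination_by r + 1 - j

-- Source B's outer `while i * i <= r:` loop of _primes_upto
def sieveOuter (comps : PySem.Set Nat) (i r : Nat) (hi : 0 < i) : PySem.Set Nat :=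
  if i * i ≤ r then sieveOuter (sieveInner comps (i * i) i r hi) (i + 1) r (by omega) else comps
termination_by r + 1 - i
decreasing_by
  have : i ≤ i * i := Nat.le_mul_of_pos_left i hi
  omega

-- Source B's _primes_upto: the sieve, then [p for p in range(2, r + 1) if p not in comps]
def primesUpto (r : Nat) : List Nat :=
  let comps := sieveOuter PySem.Set.empty 2 r (by norm_num)
  (List.range' 2 (r - 1)).filter (fun p => !(PySem.Set.contains comps p))

-- math.isqrt(mx) with mx ≥ 0 is exactly Nat.sqrt mx.toNat
def get_primary_key_list_alt (number_list : List Int) : List Int :=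
  let mx := number_list.foldl (fun mx n => if n > mx then n else mx) 0
  let primes := primesUpto (Nat.sqrt mx.toNat)
  number_list.foldl
    (fun result_list n =>
      if 2 ≤ n ∧ (primes.all
          (fun p => if (p : Int) * (p : Int) ≤ n then PySem.Int.mod n (p : Int) != 0 else true)) = true
      then result_list ++ [n] else result_list)
    []

-- ===== PRECONDITION & SPEC =====
def Spec_get_primary_key_list (number_list : List Int) (out : List Int) : Prop := out = get_primary_key_list_alt number_list
instance (number_list : List Int) (out : List Int) : Decidable (Spec_get_primary_key_list number_list out) := by unfold Spec_get_primary_key_list; infer_instance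

-- ===== CLAIM (what is proved, stated in full; the proofs are below) =====
def Claim_equal_get_primary_key_list : Prop := ∀ (number_list : List Int), Dom_get_primary_key_list number_list → Spec_get_primary_key_list number_list (get_primary_key_list number_list)

-- ===== LEMMAS AND PROOFS =====

-- membership after the inner marking loop: everything j, j+i, j+2i, … up to r was added
theorem mem_sieveInner (m : Nat) (comps : PySem.Set Nat) (j i r : Nat) (hi : 0 < i)
    (hm : r + 1 - j = m) (p : Nat) :
    p ∈ sieveInner comps j i r hi ↔ p ∈ comps ∨ ∃ k, p = j + k * i ∧ p ≤ r := by
  induction m using Nat.strong_induction_on generalizing comps j with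
  | _ m ih =>
    rw [sieveInner]
    split_ifs with h
    · rw [ih (r + 1 - (j + i)) (by omega) _ _ rfl, PySem.Set.mem_add]
      constructor
      · rintro ((hs | rfl) | ⟨k, rfl, hk⟩)
        · exact Or.inl hs
        · exact Or.inr ⟨0, by omega, h⟩
        · exact Or.inr ⟨k + 1, by ring, hk⟩
      · rintro (hs | ⟨k, rfl, hk⟩)
        · exact Or.inl (Or.inl hs)
        · cases k with
          | zero => exact Or.inl (Or.inr (by omega))
          | succ k => exact Or.inr ⟨k, by ring, hk⟩
    · constructor
      · exact Or.inl
      · rintro (hs | ⟨k, rfl, hk⟩)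
        · exact hs
        · omega

-- membership after the outer loop: p is marked iff some q ≥ i with q*q ≤ r reaches p
theorem mem_sieveOuter (m : Nat) (comps : PySem.Set Nat) (i r : Nat) (hi : 0 < i)
    (hm : r + 1 - i = m) (p : Nat) :
    p ∈ sieveOuter comps i r hi ↔
      p ∈ comps ∨ ∃ q, i ≤ q ∧ q * q ≤ r ∧ (∃ k, p = q * q + k * q) ∧ p ≤ r := by
  induction m using Nat.strong_induction_on generalizing comps i with
  | _ m ih =>
    rw [sieveOuter]
    split_ifs with h
    · have hir : i ≤ r := le_trans (Nat.le_mul_of_pos_left i hi) h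
      rw [ih (r + 1 - (i + 1)) (by omega) _ _ (by omega) rfl,
          mem_sieveInner (r + 1 - i * i) _ _ _ _ _ rfl]
      constructor
      · rintro ((hs | ⟨k, rfl, hk⟩) | ⟨q, hq1, hq2, ⟨k, rfl⟩, hk⟩)
        · exact Or.inl hs
        · exact Or.inr ⟨i, le_refl i, h, ⟨k, rfl⟩, hk⟩
        · exact Or.inr ⟨q, by omega, hq2, ⟨k, rfl⟩, hk⟩
      · rintro (hs | ⟨q, hq1, hq2, ⟨k, rfl⟩, hk⟩)
        · exact Or.inl (Or.inl hs)
        · rcases eq_or_lt_of_le hq1 with rfl | hlt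
          · exact Or.inl (Or.inr ⟨k, rfl, hk⟩)
          · exact Or.inr ⟨q, by omega, hq2, ⟨k, rfl⟩, hk⟩
    · constructor
      · exact Or.inl
      · rintro (hs | ⟨q, hq1, hq2, _, _⟩)
        · exact hs
        · have : i * i ≤ q * q := Nat.mul_le_mul hq1 hq1
          omega

-- the sieve marks, among numbers ≤ r, exactly the composite ones
theorem sieve_marks_iff (r p : Nat) :
    p ∈ sieveOuter PySem.Set.empty 2 r (by norm_num) ↔ p ≤ r ∧ 2 ≤ p ∧ ¬ p.Prime := by
  rw [mem_sieveOuter (r + 1 - 2) _ _ _ _ rfl]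
  constructor
  · rintro (hs | ⟨q, hq1, hq2, ⟨k, rfl⟩, hk⟩)
    · simp [PySem.Set.empty] at hs
    · refine ⟨hk, by nlinarith, ?_⟩
      intro hp
      have hdvd : q ∣ q * q + k * q := ⟨q + k, by ring⟩
      rcases (Nat.Prime.eq_one_or_self_of_dvd hp q hdvd) with h1 | h2
      · omega
      · nlinarith
  · rintro ⟨hpr, hp2, hnp⟩
    right
    have hq := Nat.minFac_prime (by omega : p ≠ 1)
    have hqq : p.minFac * p.minFac ≤ p := by
      have := Nat.minFac_sq_le_self (by omega : 0 < p) hnp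
      nlinarith [this]
    have hdvd : p.minFac ∣ p := Nat.minFac_dvd p
    obtain ⟨c, hc⟩ := hdvd
    have hq2 : 2 ≤ p.minFac := hq.two_le
    have hcq : p.minFac ≤ c := by nlinarith
    exact ⟨p.minFac, hq2, by omega, ⟨c - p.minFac, by nlinarith [Nat.sub_add_cancel hcq]⟩, hpr⟩

-- Source B's _primes_upto returns exactly the primes up to r (in order; only membership is needed)
theorem mem_primesUpto (r p : Nat) : p ∈ primesUpto r ↔ p.Prime ∧ p ≤ r := by
  unfold primesUpto
  simp only [List.mem_filter, List.mem_range'_1, Bool.not_eq_eq_eq_not, Bool.not_true,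
    ← Bool.not_eq_true, PySem.Set.contains_iff, sieve_marks_iff]
  constructor
  · rintro ⟨⟨h2, hlt⟩, hnm⟩
    have hpr : p ≤ r := by omega
    refine ⟨?_, hpr⟩
    by_contra hnp
    exact hnm ⟨hpr, h2, hnp⟩
  · rintro ⟨hp, hpr⟩
    have h2 := hp.two_le
    exact ⟨⟨h2, by omega⟩, fun ⟨_, _, hnp⟩ => hnp hp⟩

-- the running maximum in Source B bounds every list element and is nonnegative
theorem foldl_max_spec (xs : List Int) (a : Int) :
    a ≤ xs.foldl (fun mx n => if n > mx then n else mx) a ∧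
      ∀ n ∈ xs, n ≤ xs.foldl (fun mx n => if n > mx then n else mx) a := by
  induction xs generalizing a with
  | nil => simp
  | cons x xs ih =>
    simp only [List.foldl_cons, List.mem_cons]
    constructor
    · refine le_trans ?_ (ih (if x > a then x else a)).1
      split_ifs with h <;> omega
    · rintro n (rfl | hn)
      · refine le_trans ?_ (ih (if n > a then n else a)).1
        split_ifs with h <;> omega
      · exact (ih _).2 n hn

-- A's per-element decision is primality of the element
theorem stepA_iff (n : Int) :
    (if n < 2 then false
     else if n < 4 then true
     else !((PySem.List.pyRange 2 ((n.toNat.sqrt : Int) + 1) 1).any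
              (fun i => PySem.Int.mod n i == 0))) = true ↔ 2 ≤ n ∧ n.toNat.Prime := by
  split_ifs with h2 h4
  · simp only [false_iff]
    omega
  · have : n = 2 ∨ n = 3 := by omega
    rcases this with rfl | rfl <;> decide
  · have hn : (0:Int) ≤ n := by omega
    simp only [Bool.not_eq_eq_eq_not, Bool.not_true, ← Bool.not_eq_true, List.any_eq_true,
      not_exists]
    constructor
    · intro h
      refine ⟨by omega, ?_⟩
      rw [Nat.prime_def_le_sqrt]
      refine ⟨by omega, ?_⟩
      intro m hm2 hmsq hdvd
      apply h (m : Int)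
      refine ⟨?_, ?_⟩
      · rw [PySem.List.mem_pyRange_one]
        refine ⟨by exact_mod_cast hm2, ?_⟩
        have : (m : Int) ≤ (n.toNat.sqrt : Int) := by exact_mod_cast hmsq
        omega
      · simp only [beq_iff_eq]
        rw [PySem.Int.mod_eq_zero_iff_dvd]
        have : (m : Int) ∣ (n.toNat : Int) := Int.natCast_dvd_natCast.mpr hdvd
        rwa [Int.toNat_of_nonneg hn] at this
    · rintro ⟨-, hp⟩ i hcon
      obtain ⟨hi, hmod⟩ := hcon
      rw [PySem.List.mem_pyRange_one] at hi
      rw [beq_iff_eq] at hmod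
      rw [PySem.Int.mod_eq_zero_iff_dvd] at hmod
      have hi0 : (0:Int) ≤ i := by omega
      have hdvd : i.toNat ∣ n.toNat := by
        rw [← Int.natCast_dvd_natCast, Int.toNat_of_nonneg hi0, Int.toNat_of_nonneg hn]
        exact hmod
      have hsq : i.toNat ≤ Nat.sqrt n.toNat := by
        have : i ≤ (n.toNat.sqrt : Int) := by omega
        omega
      have := (Nat.prime_def_le_sqrt.mp hp).2 i.toNat (by omega) hsq
      exact this hdvd

-- B's per-element decision is also primality, for elements bounded by mx
theorem stepB_iff (mx n : Int) (hmx : 0 ≤ mx) (hn : n ≤ mx) :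
    (2 ≤ n ∧ ((primesUpto (Nat.sqrt mx.toNat)).all
        (fun p => if (p : Int) * (p : Int) ≤ n then PySem.Int.mod n (p : Int) != 0 else true)) = true)
      ↔ 2 ≤ n ∧ n.toNat.Prime := by
  constructor
  · rintro ⟨h2, hall⟩
    refine ⟨h2, ?_⟩
    by_contra hnp
    have hn0 : (0:Int) ≤ n := by omega
    have hN2 : 2 ≤ n.toNat := by omega
    have hq := Nat.minFac_prime (by omega : n.toNat ≠ 1)
    have hqq : n.toNat.minFac * n.toNat.minFac ≤ n.toNat := by
      have := Nat.minFac_sq_le_self (by omega : 0 < n.toNat) hnp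
      nlinarith [this]
    have hqr : n.toNat.minFac ≤ Nat.sqrt mx.toNat := by
      have h1 : n.toNat.minFac ≤ Nat.sqrt n.toNat := Nat.le_sqrt.mpr hqq
      exact le_trans h1 (Nat.sqrt_le_sqrt (by omega))
    have hmem : n.toNat.minFac ∈ primesUpto (Nat.sqrt mx.toNat) :=
      (mem_primesUpto _ _).mpr ⟨hq, hqr⟩
    have := List.all_eq_true.mp hall _ hmem
    have hcast : (n.toNat.minFac : Int) * (n.toNat.minFac : Int) ≤ n := by
      have h := hqq
      zify at h
      rwa [Int.toNat_of_nonneg hn0] at h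
    rw [if_pos hcast] at this
    simp only [bne_iff_ne, ne_eq] at this
    apply this
    rw [PySem.Int.mod_eq_zero_iff_dvd]
    have : (n.toNat.minFac : Int) ∣ (n.toNat : Int) := Int.natCast_dvd_natCast.mpr (Nat.minFac_dvd _)
    rwa [Int.toNat_of_nonneg hn0] at this
  · rintro ⟨h2, hp⟩
    refine ⟨h2, List.all_eq_true.mpr ?_⟩
    intro p hp_mem
    obtain ⟨hpp, -⟩ := (mem_primesUpto _ _).mp hp_mem
    split_ifs with hsq
    · simp only [bne_iff_ne, ne_eq]
      intro hmod
      rw [PySem.Int.mod_eq_zero_iff_dvd] at hmod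
      have hn0 : (0:Int) ≤ n := by omega
      have hdvd : p ∣ n.toNat := by
        rw [← Int.natCast_dvd_natCast, Int.toNat_of_nonneg hn0]
        exact hmod
      rcases hp.eq_one_or_self_of_dvd p hdvd with h1 | hpn
      · exact absurd h1 (by have := hpp.two_le; omega : p ≠ 1)
      · subst hpn
        have : ((n.toNat : Int)) * (n.toNat : Int) ≤ n := hsq
        rw [Int.toNat_of_nonneg hn0] at this
        nlinarith
    · rfl

-- ===== VERDICT (by name: the statement is the Claim_ definition above) =====
theorem get_primary_key_list_spec : Claim_equal_get_primary_key_list := by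
  intro xs _
  unfold Spec_get_primary_key_list get_primary_key_list get_primary_key_list_alt
  apply PySem.List.foldl_congr_mem
  intro acc n hn
  obtain ⟨hmx0, hbound⟩ := foldl_max_spec xs 0
  have hB := stepB_iff (xs.foldl (fun mx n => if n > mx then n else mx) 0) n hmx0 (hbound n hn)
  by_cases hp : 2 ≤ n ∧ n.toNat.Prime
  · have hb := hB.mpr hp
    rw [if_pos hb]
    have h2 : ¬ n < 2 := by omega
    by_cases h4 : n < 4
    · simp [h2, h4]
    · have hA := (stepA_iff n).mpr hp
      rw [if_neg h2, if_neg h4] at hA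
      simp [h2, h4, hA]
  · have hb : ¬ (2 ≤ n ∧ ((primesUpto (Nat.sqrt (xs.foldl (fun mx n => if n > mx then n else mx) 0).toNat)).all
        (fun p => if (p : Int) * (p : Int) ≤ n then PySem.Int.mod n (p : Int) != 0 else true)) = true) :=
      fun h => hp (hB.mp h)
    rw [if_neg hb]
    by_cases h2 : n < 2
    · simp [h2]
    · by_cases h4 : n < 4
      · have : n = 2 ∨ n = 3 := by omega
        rcases this with rfl | rfl <;> exact absurd (by decide) hp
      · have hA : ¬ ((if n < 2 then false
            else if n < 4 then true
            else !((PySem.List.pyRange 2 ((n.toNat.sqrt : Int) + 1) 1).any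
                  (fun i => PySem.Int.mod n i == 0))) = true) := fun h => hp ((stepA_iff n).mp h)
        rw [if_neg h2, if_neg h4] at hA
        simp only [Bool.not_eq_true, Bool.not_eq_false'] at hA
        simp [h2, h4, hA]
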